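-- pv_equiv track=rewrite | github.com/StarSein/BaekJoon | 20922.py | solution
-- ===== SOURCE A (Python) =====
-- from collections import deque
--
-- MAX_A = 100000
--
-- def solution(n, k, a_list):
--     elements_cnt = dict()
--     for i in range(1, MAX_A + 1):
--         elements_cnt[i] = 0
--     lcs = deque()  # longest continuous subsequence
--     max_length = len(lcs)
--     for i in range(n):
--         new_num = a_list[i]
--         lcs.append(new_num)
--         elements_cnt[new_num] += 1
--         if elements_cnt[new_num] > k:
--             while True:
--                 removing_num = lcs.popleft()
--                 elements_cnt[removing_num] -= 1
--                 if removing_num == new_num: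
--                     break
--         max_length = max(max_length, len(lcs))
--     return max_length
-- ===== SOURCE B (Python) =====
-- from collections import deque
--
-- MAX_A = 100000
--
-- def solution(n, k, a_list):
--     # Per-value occurrence indices; window start computed by index arithmetic,
--     # no inner pop-until loop and no 1..MAX_A counter initialization.
--     positions = {}
--     left = 0
--     max_length = 0
--     for i in range(n):
--         v = a_list[i]
--         lst = positions.setdefault(v, deque())
--         lst.append(i)
--         if len(lst) > k:
--             p = lst.popleft()
--             left = max(left, p + 1)
--         max_length = max(max_length, i - left + 1)
--     return max_length
-- ===== Notes on version B (the rewrite author's own statement) =====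
-- stated objective: alternative
-- what changed: A keeps the actual window in a deque plus a counter dict preinitialized for all 100000 possible values and shrinks the window with an inner pop-until loop; B instead keeps per-value deques of occurrence indices and derives the window start by index arithmetic (left = max(left, popped_index+1)), with no inner loop.
-- outside the precondition, e.g. on solution(2, 1, [0, 0]): A raises KeyError, B returns 1
-- crash fix: When n <= len(a_list) but some accessed value lies outside 1..100000, A raises KeyError on its preinitialized counter dict while B returns the sliding-window answer. — e.g. on solution(2, 1, [0, 0]): A raises KeyError, B returns 1
import Mathlib
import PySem

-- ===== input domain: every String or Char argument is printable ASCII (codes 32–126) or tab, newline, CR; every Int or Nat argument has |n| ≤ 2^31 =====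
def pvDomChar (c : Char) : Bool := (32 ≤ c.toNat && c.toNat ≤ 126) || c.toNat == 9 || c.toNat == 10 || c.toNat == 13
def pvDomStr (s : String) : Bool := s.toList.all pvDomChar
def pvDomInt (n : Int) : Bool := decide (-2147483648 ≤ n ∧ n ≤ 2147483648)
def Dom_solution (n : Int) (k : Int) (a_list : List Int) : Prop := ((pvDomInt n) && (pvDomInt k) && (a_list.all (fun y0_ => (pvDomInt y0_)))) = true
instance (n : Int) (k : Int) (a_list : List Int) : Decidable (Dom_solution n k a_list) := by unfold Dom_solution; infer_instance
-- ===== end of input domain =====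

-- B replaces A's window deque + counter (with its 1..100000 zero-initialization and inner pop-until
-- loop) by a dict of per-value occurrence-index deques and computes the window start by index
-- arithmetic (alternative decomposition; also avoids the fixed 100000-key initialization).

-- ===== PORT A =====
-- the inner `while True: removing_num = lcs.popleft(); ...` loop; [] case is Python's
-- IndexError on an empty deque, unreachable since the target was just appended
def pvPopUntil (lcs : List Int) (counts : Int → Int) (target : Int) : List Int × (Int → Int) :=
  match lcs with
  | [] => ([], counts)
  | x :: rest =>
    let counts' := fun u => if u = x then counts u - 1 else counts u
    if x = target then (rest, counts') else pvPopUntil rest counts' target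

-- elements_cnt (dict with keys 1..100000 all 0, then only updated) is modeled as a total
-- function Int → Int starting at 0: exact on Pre_, which excludes the KeyError inputs
def pvStepA (a_list : List Int) (k : Int) (st : List Int × (Int → Int) × Int) (i : Int) :
    List Int × (Int → Int) × Int :=
  let new_num := PySem.List.pyGetD a_list i 0   -- a_list[i]; in range under Pre_
  let lcs1 := st.1 ++ [new_num]
  let counts1 := fun u => if u = new_num then st.2.1 u + 1 else st.2.1 u
  let res := if counts1 new_num > k then pvPopUntil lcs1 counts1 new_num else (lcs1, counts1)
  (res.1, res.2, max st.2.2 (res.1.length : Int))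

def solution (n : Int) (k : Int) (a_list : List Int) : Int :=
  ((PySem.List.pyRange 0 n 1).foldl (pvStepA a_list k) ([], fun _ => 0, 0)).2.2

-- ===== PORT B =====
def pvStepB (a_list : List Int) (k : Int) (st : PySem.Dict Int (List Int) × Int × Int) (i : Int) :
    PySem.Dict Int (List Int) × Int × Int :=
  let v := PySem.List.pyGetD a_list i 0         -- a_list[i]; in range under Pre_
  let lst := ((st.1.get? v).getD []) ++ [i]     -- positions.setdefault(v, deque()); lst.append(i)
  let res :=
    if (lst.length : Int) > k then
      (st.1.insert v lst.tail, max st.2.1 (lst.headD 0 + 1))   -- p = lst.popleft(); left = max(left, p+1)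
    else
      (st.1.insert v lst, st.2.1)
  (res.1, res.2, max st.2.2 (i - res.2 + 1))

def solution_alt (n : Int) (k : Int) (a_list : List Int) : Int :=
  ((PySem.List.pyRange 0 n 1).foldl (pvStepB a_list k) (PySem.Dict.empty, 0, 0)).2.2

-- ===== PRECONDITION & SPEC =====
-- Pre_ excludes exactly the inputs where the Python A raises: n > len(a_list) (IndexError on
-- a_list[i]) and accessed values outside 1..100000 (KeyError on elements_cnt[new_num]).
def Pre_solution (n : Int) (k : Int) (a_list : List Int) : Prop :=
  n ≤ (a_list.length : Int) ∧ ∀ x ∈ a_list.take n.toNat, 1 ≤ x ∧ x ≤ 100000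
instance (n : Int) (k : Int) (a_list : List Int) : Decidable (Pre_solution n k a_list) := by
  unfold Pre_solution; infer_instance

def pvWitness_solution : Int × Int × List Int := (3, 2, [1, 1, 1])

-- On inputs with n ≤ len(a_list) but some accessed value outside 1..100000, A raises KeyError
-- while B returns the sliding-window answer.
def Raises_solution (n : Int) (k : Int) (a_list : List Int) : Prop :=
  n ≤ (a_list.length : Int) ∧ ¬ (∀ x ∈ a_list.take n.toNat, 1 ≤ x ∧ x ≤ 100000)
instance (n : Int) (k : Int) (a_list : List Int) : Decidable (Raises_solution n k a_list) := by
  unfold Raises_solution; infer_instance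
def pvRaiseWitness_solution : Int × Int × List Int := (2, 1, [0, 0])
def pvRaiseWitnessOut_solution : Int := 1

def Spec_solution (n : Int) (k : Int) (a_list : List Int) (out : Int) : Prop := out = solution_alt n k a_list
instance (n : Int) (k : Int) (a_list : List Int) (out : Int) : Decidable (Spec_solution n k a_list out) := by unfold Spec_solution; infer_instance

-- ===== CLAIM (what is proved, stated in full; the proofs are below) =====
def Claim_equal_solution : Prop := ∀ (n : Int) (k : Int) (a_list : List Int), Dom_solution n k a_list → Pre_solution n k a_list → Spec_solution n k a_list (solution n k a_list)

def Claim_raises_solution : Prop := (∀ (n : Int) (k : Int) (a_list : List Int), Dom_solution n k a_list → Raises_solution n k a_list → ¬ Pre_solution n k a_list) ∧ (Dom_solution (pvRaiseWitness_solution.1) (pvRaiseWitness_solution.2.1) (pvRaiseWitness_solution.2.2) ∧ Raises_solution (pvRaiseWitness_solution.1) (pvRaiseWitness_solution.2.1) (pvRaiseWitness_solution.2.2) ∧ solution_alt (pvRaiseWitness_solution.1) (pvRaiseWitness_solution.2.1) (pvRaiseWitness_solution.2.2) = pvRaiseWitnessOut_solution)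


-- ===== LEMMAS AND PROOFS =====

-- element a_list[j] as both ports read it (getD through pyGetD)
def pvAv (a : List Int) (j : Nat) : Int := a.getD j 0
-- the window a[L:m] of values
def pvWin (a : List Int) (L m : Nat) : List Int := (List.range' L (m - L)).map (pvAv a)
-- indices j < m with a[j] = v, ascending
def pvOcc (a : List Int) (v : Int) (m : Nat) : List Nat :=
  (List.range m).filter (fun j => pvAv a j = v)
-- the last min(|occ|, K) occurrence indices: contents of B's per-value deque
def pvPosL (a : List Int) (K : Nat) (v : Int) (m : Nat) : List Nat :=
  (pvOcc a v m).drop ((pvOcc a v m).length - min (pvOcc a v m).length K)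

def pvStA (a : List Int) (k : Int) : Nat → List Int × (Int → Int) × Int
  | 0 => ([], fun _ => 0, 0)
  | m+1 => pvStepA a k (pvStA a k m) m

def pvStB (a : List Int) (k : Int) : Nat → PySem.Dict Int (List Int) × Int × Int
  | 0 => (PySem.Dict.empty, 0, 0)
  | m+1 => pvStepB a k (pvStB a k m) m

lemma pv_foldl_range_stA (a : List Int) (k : Int) (M : Nat) :
    (List.range M).foldl (fun s (j : Nat) => pvStepA a k s (j : Int)) ([], fun _ => 0, 0) = pvStA a k M := by
  induction M with
  | zero => rfl
  | succ M ih => rw [List.range_succ, List.foldl_append, ih]; rfl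

lemma pv_foldl_range_stB (a : List Int) (k : Int) (M : Nat) :
    (List.range M).foldl (fun s (j : Nat) => pvStepB a k s (j : Int)) (PySem.Dict.empty, 0, 0) = pvStB a k M := by
  induction M with
  | zero => rfl
  | succ M ih => rw [List.range_succ, List.foldl_append, ih]; rfl

lemma pv_solution_eq_stA (n k : Int) (a : List Int) :
    solution n k a = (pvStA a k n.toNat).2.2 := by
  unfold solution
  rw [PySem.List.pyRange_one, List.foldl_map]
  simp only [zero_add, Int.sub_zero]
  rw [pv_foldl_range_stA]

lemma pv_solution_alt_eq_stB (n k : Int) (a : List Int) :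
    solution_alt n k a = (pvStB a k n.toNat).2.2 := by
  unfold solution_alt
  rw [PySem.List.pyRange_one, List.foldl_map]
  simp only [zero_add, Int.sub_zero]
  rw [pv_foldl_range_stB]

lemma pv_win_len (a : List Int) (L m : Nat) : (pvWin a L m).length = m - L := by
  simp [pvWin]

lemma pv_win_succ (a : List Int) (L m : Nat) (hL : L ≤ m) :
    pvWin a L (m+1) = pvWin a L m ++ [pvAv a m] := by
  unfold pvWin
  have h1 : m + 1 - L = (m - L) + 1 := by omega
  rw [h1, List.range'_1_concat, List.map_append]
  have h2 : L + (m - L) = m := by omega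
  rw [h2]
  rfl

lemma pv_win_self (a : List Int) (m : Nat) : pvWin a m m = [] := by
  simp [pvWin]

lemma pv_occ_succ (a : List Int) (v : Int) (m : Nat) :
    pvOcc a v (m+1) = pvOcc a v m ++ if pvAv a m = v then [m] else [] := by
  unfold pvOcc
  rw [List.range_succ, List.filter_append]
  congr 1
  by_cases h : pvAv a m = v <;> simp [h]

lemma pv_occ_sorted (a : List Int) (v : Int) (m : Nat) : (pvOcc a v m).Pairwise (· < ·) :=
  List.Pairwise.filter _ List.pairwise_lt_range

lemma pv_occ_mem (a : List Int) (v : Int) (m : Nat) (j : Nat) (h : j ∈ pvOcc a v m) :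
    j < m ∧ pvAv a j = v := by
  unfold pvOcc at h
  simp only [List.mem_filter, List.mem_range, decide_eq_true_eq] at h
  exact h

lemma pv_mem_occ (a : List Int) (v : Int) (m : Nat) (j : Nat) (h1 : j < m) (h2 : pvAv a j = v) :
    j ∈ pvOcc a v m := by
  unfold pvOcc
  simp only [List.mem_filter, List.mem_range, decide_eq_true_eq]
  exact ⟨h1, h2⟩

-- window count = number of occurrence indices ≥ L
lemma pv_count_eq (a : List Int) (L m : Nat) (hL : L ≤ m) (u : Int) :
    (pvWin a L m).count u = ((pvOcc a u m).filter (fun j => decide (L ≤ j))).length := by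
  unfold pvWin pvOcc
  rw [List.count_eq_countP, List.countP_map, List.filter_filter, ← List.countP_eq_length_filter]
  have hsplit : List.range m = List.range' 0 L ++ List.range' L (m - L) := by
    have h : List.range' 0 L ++ List.range' (0+1*L) (m-L) = List.range' 0 (L+(m-L)) :=
      List.range'_append ..
    simpa [List.range_eq_range', show L+(m-L)=m by omega, show 0+1*L = L by omega] using h.symm
  rw [hsplit, List.countP_append]
  have h1 : (List.range' 0 L).countP (fun j => decide (L ≤ j) && decide (pvAv a j = u)) = 0 := by
    rw [List.countP_eq_zero]
    intro j hj
    have := List.mem_range'_1.1 hj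
    simp [show ¬ (L ≤ j) by omega]
  rw [h1, Nat.zero_add]
  apply List.countP_congr
  intro j hj
  have := List.mem_range'_1.1 hj
  simp [Function.comp, show L ≤ j from this.1, beq_iff_eq]

-- a strictly increasing list splits into (elements < L) ++ (elements ≥ L)
lemma pv_filter_ge_split (l : List Nat) (h : l.Pairwise (· < ·)) (L : Nat) :
    ∃ t, l = t ++ l.filter (fun j => decide (L ≤ j)) ∧ ∀ j ∈ t, j < L := by
  induction l with
  | nil => exact ⟨[], rfl, by simp⟩
  | cons x xs ih =>
    rw [List.pairwise_cons] at h
    by_cases hLx : L ≤ x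
    · refine ⟨[], ?_, by simp⟩
      rw [List.filter_cons, if_pos (by simpa), List.filter_eq_self.2 ?_, List.nil_append]
      intro y hy
      simpa using le_of_lt (lt_of_le_of_lt hLx (h.1 y hy))
    · obtain ⟨t, ht, htlt⟩ := ih h.2
      refine ⟨x :: t, ?_, ?_⟩
      · rw [List.filter_cons, if_neg (by simpa using hLx), List.cons_append]
        exact congrArg (x :: ·) ht
      · intro j hj
        rcases List.mem_cons.1 hj with rfl | hj
        · omega
        · exact htlt j hj

lemma pv_posL_len (a : List Int) (K : Nat) (v : Int) (m : Nat) :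
    (pvPosL a K v m).length = min (pvOcc a v m).length K := by
  unfold pvPosL
  rw [List.length_drop]
  omega

lemma pv_posL_succ_ne (a : List Int) (K : Nat) (u : Int) (m : Nat) (h : pvAv a m ≠ u) :
    pvPosL a K u (m+1) = pvPosL a K u m := by
  unfold pvPosL
  rw [pv_occ_succ, if_neg h, List.append_nil]

-- how B's per-value deque evolves at index m when a[m] = v (for K ≥ 1)
lemma pv_posL_succ_self (a : List Int) (K : Nat) (v : Int) (m : Nat)
    (hv : pvAv a m = v) (hK : 1 ≤ K) :
    pvPosL a K v (m+1) =
      (if (pvOcc a v m).length < K then pvPosL a K v m else (pvPosL a K v m).tail) ++ [m] := by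
  unfold pvPosL
  rw [pv_occ_succ, if_pos hv]
  rw [List.length_append, List.length_singleton]
  by_cases hlen : (pvOcc a v m).length < K
  · rw [if_pos hlen]
    have h1 : (pvOcc a v m).length + 1 - min ((pvOcc a v m).length + 1) K = 0 := by omega
    have h2 : (pvOcc a v m).length - min (pvOcc a v m).length K = 0 := by omega
    rw [h1, h2, List.drop_zero, List.drop_zero]
  · rw [if_neg hlen]
    have h1 : (pvOcc a v m).length + 1 - min ((pvOcc a v m).length + 1) K
        = (pvOcc a v m).length + 1 - K := by omega
    rw [h1, List.drop_append_of_le_length (by omega), List.tail_drop]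
    congr 2
    omega

-- splitting the window at the first in-window occurrence p of v
lemma pv_win_split (a : List Int) (L p m : Nat) (v : Int) (hp : pvAv a p = v)
    (h1 : L ≤ p) (h2 : p < m) (hno : ∀ j, L ≤ j → j < p → pvAv a j ≠ v) :
    pvWin a L m = pvWin a L p ++ v :: pvWin a (p+1) m ∧ v ∉ pvWin a L p := by
  constructor
  · unfold pvWin
    have hsplit : List.range' L (m - L) = List.range' L (p - L) ++ List.range' p (m - p) := by
      have h := List.range'_append (s := L) (m := p - L) (n := m - p) (step := 1)
      rw [show L + 1*(p-L) = p from by omega, show p - L + (m - p) = m - L from by omega] at h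
      exact h.symm
    have hcons : List.range' p (m - p) = p :: List.range' (p+1) (m - p - 1) := by
      rw [show m - p = (m - p - 1) + 1 by omega, List.range'_succ]
      norm_num
    rw [hsplit, hcons, List.map_append, List.map_cons, hp,
      show m - p - 1 = m - (p+1) by omega]
  · unfold pvWin
    intro hmem
    obtain ⟨j, hj, hje⟩ := List.mem_map.1 hmem
    have := List.mem_range'_1.1 hj
    exact hno j this.1 (by omega) hje

-- the inner pop-until loop, solved: it removes the prefix through the first occurrence of v
lemma pv_popUntil_spec (l₁ : List Int) (v : Int) (h : v ∉ l₁) :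
    ∀ (l₂ : List Int) (counts : Int → Int),
      pvPopUntil (l₁ ++ v :: l₂) counts v =
        (l₂, fun u => counts u - ((l₁ ++ [v]).count u : Int)) := by
  induction l₁ with
  | nil =>
    intro l₂ counts
    simp only [List.nil_append, pvPopUntil]
    refine Prod.ext rfl ?_
    funext u
    by_cases hu : u = v
    · simp [hu]
    · simp [hu, Ne.symm hu]
  | cons x l₁ ih =>
    intro l₂ counts
    have hxv : x ≠ v := fun he => h (he ▸ List.mem_cons_self ..)
    simp only [List.cons_append, pvPopUntil, if_neg hxv]
    rw [ih (fun hm => h (List.mem_cons_of_mem _ hm)) l₂]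
    refine Prod.ext rfl ?_
    funext u
    by_cases hu : u = x
    · subst hu
      simp only [List.count_cons, beq_iff_eq]
      push_cast
      simp
      ring
    · simp only [List.count_cons, if_neg hu, beq_iff_eq]
      push_cast
      rw [if_neg (fun he => hu he.symm)]
      ring

lemma pv_all_count_zero (l : List Int) (h : ∀ u : Int, l.count u = 0) : l = [] := by
  cases l with
  | nil => rfl
  | cons x xs => have := h x; simp [List.count_cons] at this

-- the joint loop invariant: after m steps both ports share the window start L,
-- A holds the window and its counts, B holds the per-value occurrence deques, same best
def pvInv (a : List Int) (k : Int) (m L : Nat) : Prop :=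
  L ≤ m ∧
  (pvStA a k m).1 = pvWin a L m ∧
  (pvStA a k m).2.1 = (fun u => ((pvWin a L m).count u : Int)) ∧
  (∀ u, (pvWin a L m).count u ≤ k.toNat) ∧
  (pvStB a k m).2.1 = (L : Int) ∧
  (∀ v, ((pvStB a k m).1.get? v).getD [] = (pvPosL a k.toNat v m).map (fun (j : Nat) => (j : Int))) ∧
  (pvStA a k m).2.2 = (pvStB a k m).2.2

-- step at index m when k ≤ 0: both windows empty out, window start becomes m+1
lemma pv_step_nonpos (a : List Int) (k : Int) (m L : Nat) (hk : k ≤ 0)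
    (h : pvInv a k m L) : pvInv a k (m+1) (m+1) := by
  obtain ⟨hLm, hA1, hA2, hval, hBl, hBpos, hbest⟩ := h
  have hK0 : k.toNat = 0 := Int.toNat_of_nonpos hk
  have hwin0 : pvWin a L m = [] := pv_all_count_zero _ (fun u => by have := hval u; omega)
  have hLem : m = L := by
    have hlen := pv_win_len a L m
    rw [hwin0] at hlen
    simp at hlen
    omega
  subst hLem
  have hnum : PySem.List.pyGetD a (m : Int) 0 = pvAv a m := PySem.List.pyGetD_natCast a m 0
  have hcnt : (pvStA a k m).2.1 = (fun _ => (0 : Int)) := by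
    rw [hA2]; funext u; rw [hwin0]; simp
  have hposm : pvPosL a k.toNat (pvAv a m) m = [] := by
    unfold pvPosL
    rw [hK0]
    simp
  -- A's step computes
  have hstepA : pvStA a k (m+1) = ([], fun u => (if u = pvAv a m then (0:Int) + 1 else 0) - (List.count u [pvAv a m] : Int), max (pvStA a k m).2.2 0) := by
    show pvStepA a k (pvStA a k m) (m : Int) = _
    simp only [pvStepA, hnum, hA1, hwin0, hcnt, List.nil_append]
    rw [if_pos (by simp; omega)]
    rw [show [pvAv a m] = [] ++ pvAv a m :: [] by simp]
    rw [pv_popUntil_spec [] (pvAv a m) (by simp) [] _]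
    simp
  -- B's step computes
  have hstepB : pvStB a k (m+1) = ((pvStB a k m).1.insert (pvAv a m) [], (m:Int) + 1, max (pvStB a k m).2.2 ((m:Int) - ((m:Int)+1) + 1)) := by
    show pvStepB a k (pvStB a k m) (m : Int) = _
    simp only [pvStepB, hnum, hBpos (pvAv a m), hposm, List.map_nil, List.nil_append]
    rw [if_pos (by simp; omega)]
    simp only [List.tail_cons, List.headD_cons, hBl]
    rw [max_eq_right (by push_cast; omega)]
  refine ⟨le_refl _, ?_, ?_, ?_, ?_, ?_, ?_⟩
  · rw [hstepA, pv_win_self]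
  · rw [hstepA, pv_win_self]
    funext u
    by_cases hu : u = pvAv a m
    · simp [hu]
    · have hu' : pvAv a m ≠ u := fun he => hu he.symm
      simp [hu, hu']
  · intro u; rw [pv_win_self]; simp
  · rw [hstepB]; push_cast; ring
  · intro u
    rw [hstepB]
    by_cases hu : u = pvAv a m
    · subst hu
      rw [PySem.Dict.get?_insert_self]
      unfold pvPosL
      rw [hK0]
      simp
    · rw [PySem.Dict.get?_insert, if_neg hu, hBpos u, pv_posL_succ_ne a _ u m (fun he => hu he.symm)]
  · rw [hstepA, hstepB, hbest]
    simp

-- step at index m when k ≥ 1 and the new value overflows the window: both ports move the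
-- window start to p+1 where p is the first in-window occurrence of a[m]
lemma pv_step_trigger (a : List Int) (k : Int) (m L : Nat) (hk : 1 ≤ k)
    (hCA : k < ((pvWin a L m).count (pvAv a m) : Int) + 1)
    (h : pvInv a k m L) : ∃ p, L ≤ p ∧ p < m ∧ pvInv a k (m+1) (p+1) := by
  obtain ⟨hLm, hA1, hA2, hval, hBl, hBpos, hbest⟩ := h
  have hKk : (k.toNat : Int) = k := Int.toNat_of_nonneg (by omega)
  have hK1 : 1 ≤ k.toNat := by omega
  have hnum : PySem.List.pyGetD a (m : Int) 0 = pvAv a m := PySem.List.pyGetD_natCast a m 0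
  have hcWK : (pvWin a L m).count (pvAv a m) = k.toNat := by
    have := hval (pvAv a m)
    omega
  have hcnt := pv_count_eq a L m hLm (pvAv a m)
  have hFne : (pvOcc a (pvAv a m) m).filter (fun j => decide (L ≤ j)) ≠ [] := by
    intro hnil
    rw [hnil] at hcnt
    simp at hcnt
    omega
  obtain ⟨p, F', hF⟩ := List.exists_cons_of_ne_nil hFne
  have hpF : p ∈ (pvOcc a (pvAv a m) m).filter (fun j => decide (L ≤ j)) :=
    hF ▸ List.mem_cons_self ..
  have hpo : p ∈ pvOcc a (pvAv a m) m := (List.mem_filter.1 hpF).1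
  have hLp : L ≤ p := by have := (List.mem_filter.1 hpF).2; simpa using this
  obtain ⟨hpm, hpav⟩ := pv_occ_mem a (pvAv a m) m p hpo
  obtain ⟨t, hto, htlt⟩ := pv_filter_ge_split _ (pv_occ_sorted a (pvAv a m) m) L
  have hsort := pv_occ_sorted a (pvAv a m) m
  rw [hto, hF] at hsort
  have hpF' : ∀ x ∈ F', p < x := (List.pairwise_cons.1 (List.pairwise_append.1 hsort).2.1).1
  have hno : ∀ j, L ≤ j → j < p → pvAv a j ≠ pvAv a m := by
    intro j hLj hjp hjv
    have hjo : j ∈ pvOcc a (pvAv a m) m := pv_mem_occ a (pvAv a m) m j (by omega) hjv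
    rw [hto, hF] at hjo
    rcases List.mem_append.1 hjo with hjt | hjc
    · have := htlt j hjt; omega
    · rcases List.mem_cons.1 hjc with rfl | hjF'
      · omega
      · have := hpF' j hjF'; omega
  obtain ⟨hsplitw, hvnot⟩ := pv_win_split a L p m (pvAv a m) hpav hLp hpm hno
  have hl1v : (pvWin a L p).count (pvAv a m) = 0 := List.count_eq_zero.2 hvnot
  have hlenF : ((pvOcc a (pvAv a m) m).filter (fun j => decide (L ≤ j))).length = k.toNat := by
    omega
  have hFlen' : F'.length + 1 = k.toNat := by
    have := congrArg List.length hF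
    simp at this
    omega
  have hlento : (pvOcc a (pvAv a m) m).length = t.length + k.toNat := by
    have := congrArg List.length hto
    rw [List.length_append] at this
    omega
  have hposL : pvPosL a k.toNat (pvAv a m) m
      = (pvOcc a (pvAv a m) m).filter (fun j => decide (L ≤ j)) := by
    unfold pvPosL
    rw [show (pvOcc a (pvAv a m) m).length
        - min (pvOcc a (pvAv a m) m).length k.toNat = t.length from by omega]
    nth_rewrite 1 [hto]
    rw [List.drop_left]
  -- the window splits as l₁ ++ v :: l₂w; A pops l₁ ++ [v]
  have hstepA : pvStA a k (m+1) =
      (pvWin a (p+1) m ++ [pvAv a m],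
       fun u => (if u = pvAv a m then ((pvWin a L m).count u : Int) + 1 else ((pvWin a L m).count u : Int))
         - ((pvWin a L p ++ [pvAv a m]).count u : Int),
       max (pvStA a k m).2.2 (((pvWin a (p+1) m ++ [pvAv a m]).length : Nat) : Int)) := by
    show pvStepA a k (pvStA a k m) (m : Int) = _
    simp only [pvStepA, hnum, hA1, hA2]
    rw [if_pos (by simpa using hCA)]
    rw [show pvWin a L m ++ [pvAv a m]
        = pvWin a L p ++ pvAv a m :: (pvWin a (p+1) m ++ [pvAv a m]) from by
      rw [hsplitw]; simp]
    rw [pv_popUntil_spec (pvWin a L p) (pvAv a m) hvnot _ _]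
  have hwin' : pvWin a (p+1) (m+1) = pvWin a (p+1) m ++ [pvAv a m] :=
    pv_win_succ a (p+1) m (by omega)
  have hcnt2 : ∀ u, (pvWin a L m).count u
      = (pvWin a L p).count u + ((pvWin a (p+1) m).count u + if pvAv a m = u then 1 else 0) := by
    intro u
    rw [hsplitw, List.count_append, List.count_cons]
    by_cases hu : pvAv a m = u <;> simp [hu]
  have hcnt3 : ∀ u, (pvWin a (p+1) (m+1)).count u
      = (pvWin a (p+1) m).count u + if pvAv a m = u then 1 else 0 := by
    intro u
    rw [hwin', List.count_append, List.count_singleton]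
    by_cases hu : pvAv a m = u
    · simp [hu]
    · simp [hu]
  refine ⟨p, hLp, hpm, by omega, ?_, ?_, ?_, ?_, ?_, ?_⟩
  · rw [hstepA, hwin']
  · rw [hstepA]
    funext u
    simp only []
    rw [hcnt3 u, List.count_append, List.count_singleton]
    by_cases hu : u = pvAv a m
    · subst hu
      rw [hcnt2 (pvAv a m)] 
      simp [hl1v]
    · have hu' : pvAv a m ≠ u := fun he => hu he.symm
      rw [hcnt2 u]
      simp [hu, hu']
  · intro u
    rw [hcnt3 u]
    have h1 := hval u
    rw [hcnt2 u] at h1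
    omega
  · rw [show pvStB a k (m+1) = pvStepB a k (pvStB a k m) (m : Int) from rfl]
    simp only [pvStepB, hnum, hBpos (pvAv a m), hposL, hF, List.map_cons, List.cons_append]
    rw [if_pos (by
      simp only [List.length_cons, List.length_append, List.length_map, List.length_nil]
      push_cast
      omega)]
    simp only [List.headD_cons, hBl]
    rw [max_eq_right (by push_cast; omega)]
    push_cast
    ring
  · intro u
    rw [show pvStB a k (m+1) = pvStepB a k (pvStB a k m) (m : Int) from rfl]
    simp only [pvStepB, hnum, hBpos (pvAv a m), hposL, hF, List.map_cons, List.cons_append]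
    rw [if_pos (by
      simp only [List.length_cons, List.length_append, List.length_map, List.length_nil]
      push_cast
      omega)]
    by_cases hu : u = pvAv a m
    · subst hu
      rw [PySem.Dict.get?_insert_self]
      rw [pv_posL_succ_self a k.toNat (pvAv a m) m rfl hK1, if_neg (by omega), hposL, hF]
      simp
    · rw [PySem.Dict.get?_insert, if_neg hu, hBpos u,
        pv_posL_succ_ne a _ u m (fun he => hu he.symm)]
  · rw [hstepA]
    rw [show pvStB a k (m+1) = pvStepB a k (pvStB a k m) (m : Int) from rfl]
    simp only [pvStepB, hnum, hBpos (pvAv a m), hposL, hF, List.map_cons, List.cons_append]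
    rw [if_pos (by
      simp only [List.length_cons, List.length_append, List.length_map, List.length_nil]
      push_cast
      omega)]
    simp only [List.headD_cons, hBl]
    rw [show max ((L : Nat) : Int) ((p : Int) + 1) = (p : Int) + 1 from
      max_eq_right (by push_cast; omega)]
    rw [hbest]
    have hlen2 : (((pvWin a (p+1) m ++ [pvAv a m]).length : Nat) : Int) = (m : Int) - (↑p + 1) + 1 := by
      simp [pv_win_len]
      omega
    rw [hlen2]

-- when the in-window count of v is below the length of B's deque for v, the deque's head
-- is a stale index left of the window
lemma pv_stale_head (a : List Int) (v : Int) (m L K : Nat) (hLm : L ≤ m)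
    (hcW : (pvWin a L m).count v < min (pvOcc a v m).length K) :
    ∃ q rest, pvPosL a K v m = q :: rest ∧ q < L := by
  obtain ⟨t, hto, htlt⟩ := pv_filter_ge_split _ (pv_occ_sorted a v m) L
  have hcnt := pv_count_eq a L m hLm v
  have hlt : (pvOcc a v m).length - min (pvOcc a v m).length K ≤ t.length := by
    have := congrArg List.length hto
    rw [List.length_append] at this
    omega
  have hdrop : pvPosL a K v m
      = t.drop ((pvOcc a v m).length - min (pvOcc a v m).length K)
        ++ (pvOcc a v m).filter (fun j => decide (L ≤ j)) := by
    unfold pvPosL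
    nth_rewrite 3 [hto]
    rw [List.drop_append_of_le_length hlt]
  have hne : t.drop ((pvOcc a v m).length - min (pvOcc a v m).length K) ≠ [] := by
    intro hnil
    have := congrArg List.length hnil
    rw [List.length_drop] at this
    have := congrArg List.length hto
    rw [List.length_append] at this
    simp at *
    omega
  obtain ⟨q, rest', hqr⟩ := List.exists_cons_of_ne_nil hne
  refine ⟨q, rest' ++ (pvOcc a v m).filter (fun j => decide (L ≤ j)), ?_, ?_⟩
  · rw [hdrop, hqr, List.cons_append]
  · exact htlt q (List.mem_of_mem_drop (hqr ▸ List.mem_cons_self ..))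

-- step at index m when k ≥ 1 and the window stays valid: window start is unchanged
lemma pv_step_quiet (a : List Int) (k : Int) (m L : Nat) (hk : 1 ≤ k)
    (hCA : ¬ k < ((pvWin a L m).count (pvAv a m) : Int) + 1)
    (h : pvInv a k m L) : pvInv a k (m+1) L := by
  obtain ⟨hLm, hA1, hA2, hval, hBl, hBpos, hbest⟩ := h
  have hKk : (k.toNat : Int) = k := Int.toNat_of_nonneg (by omega)
  have hK1 : 1 ≤ k.toNat := by omega
  have hnum : PySem.List.pyGetD a (m : Int) 0 = pvAv a m := PySem.List.pyGetD_natCast a m 0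
  have hcWK : (pvWin a L m).count (pvAv a m) + 1 ≤ k.toNat := by
    push_neg at hCA
    omega
  -- A takes the no-pop branch
  have hstepA : pvStA a k (m+1) =
      (pvWin a L m ++ [pvAv a m],
       fun u => if u = pvAv a m then ((pvWin a L m).count u : Int) + 1 else ((pvWin a L m).count u : Int),
       max (pvStA a k m).2.2 (((pvWin a L m ++ [pvAv a m]).length : Nat) : Int)) := by
    show pvStepA a k (pvStA a k m) (m : Int) = _
    simp only [pvStepA, hnum, hA1, hA2]
    rw [if_neg (by simpa using hCA)]
  have hwinS := pv_win_succ a L m hLm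
  have hcount : ∀ u, (pvWin a L (m+1)).count u
      = (pvWin a L m).count u + if u = pvAv a m then 1 else 0 := by
    intro u
    rw [hwinS, List.count_append]
    by_cases hu : u = pvAv a m
    · simp [hu]
    · have hu' : pvAv a m ≠ u := fun he => hu he.symm
      simp [hu, hu']
  have hc2 : (pvStA a k (m+1)).1 = pvWin a L (m+1) := by rw [hstepA, hwinS]
  have hc3 : (pvStA a k (m+1)).2.1 = (fun u => ((pvWin a L (m+1)).count u : Int)) := by
    rw [hstepA]
    funext u
    rw [hcount u]
    by_cases hu : u = pvAv a m <;> simp [hu]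
  have hc4 : ∀ u, (pvWin a L (m+1)).count u ≤ k.toNat := by
    intro u
    rw [hcount u]
    by_cases hu : u = pvAv a m
    · subst hu; simp only [eq_self_iff_true, if_true]; omega
    · have := hval u; simp [hu]; omega
  have hlenbest : (((pvWin a L m ++ [pvAv a m]).length : Nat) : Int) = (m : Int) - L + 1 := by
    simp [pv_win_len]
    omega
  by_cases hCB : ((min (pvOcc a (pvAv a m) m).length k.toNat + 1 : Nat) : Int) > k
  · -- B pops a stale index q < L; the window start is unchanged
    push_cast at hCB
    have hminK : k.toNat ≤ min (pvOcc a (pvAv a m) m).length k.toNat := by omega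
    obtain ⟨q, rest, hqr, hqL⟩ := pv_stale_head a (pvAv a m) m L k.toNat hLm (by omega)
    have hlen : rest.length + 1 = min (pvOcc a (pvAv a m) m).length k.toNat := by
      have := pv_posL_len a k.toNat (pvAv a m) m
      rw [hqr] at this
      simpa using this
    have hstepB : pvStB a k (m+1) =
        ((pvStB a k m).1.insert (pvAv a m) (rest.map (fun (j : Nat) => (j : Int)) ++ [(m : Int)]),
         (L : Int), max (pvStB a k m).2.2 ((m : Int) - L + 1)) := by
      show pvStepB a k (pvStB a k m) (m : Int) = _
      simp only [pvStepB, hnum, hBpos (pvAv a m), hqr, List.map_cons, List.cons_append]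
      rw [if_pos (by
        simp only [List.length_cons, List.length_append, List.length_map, List.length_nil]
        push_cast
        omega)]
      simp only [List.headD_cons, List.tail_cons, hBl]
      rw [max_eq_left (by exact_mod_cast hqL)]
    refine ⟨by omega, hc2, hc3, hc4, ?_, ?_, ?_⟩
    · rw [hstepB]
    · intro u
      rw [hstepB]
      by_cases hu : u = pvAv a m
      · subst hu
        rw [PySem.Dict.get?_insert_self]
        rw [pv_posL_succ_self a k.toNat (pvAv a m) m rfl hK1, if_neg (by omega), hqr]
        simp
      · rw [PySem.Dict.get?_insert, if_neg hu, hBpos u,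
          pv_posL_succ_ne a _ u m (fun he => hu he.symm)]
    · rw [hstepA, hstepB, hbest, hlenbest]
  · -- B appends without popping; the window start is unchanged
    push_cast at hCB
    have hstepB : pvStB a k (m+1) =
        ((pvStB a k m).1.insert (pvAv a m)
          ((pvPosL a k.toNat (pvAv a m) m).map (fun (j : Nat) => (j : Int)) ++ [(m : Int)]),
         (L : Int), max (pvStB a k m).2.2 ((m : Int) - L + 1)) := by
      show pvStepB a k (pvStB a k m) (m : Int) = _
      simp only [pvStepB, hnum, hBpos (pvAv a m)]
      rw [if_neg (by simp only [List.length_append, List.length_map, pv_posL_len,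
        List.length_cons, List.length_nil]; push_cast; omega)]
      rw [hBl]
    refine ⟨by omega, hc2, hc3, hc4, ?_, ?_, ?_⟩
    · rw [hstepB]
    · intro u
      rw [hstepB]
      by_cases hu : u = pvAv a m
      · subst hu
        rw [PySem.Dict.get?_insert_self]
        rw [pv_posL_succ_self a k.toNat (pvAv a m) m rfl hK1, if_pos (by omega)]
        simp
      · rw [PySem.Dict.get?_insert, if_neg hu, hBpos u,
          pv_posL_succ_ne a _ u m (fun he => hu he.symm)]
    · rw [hstepA, hstepB, hbest, hlenbest]

lemma pv_main (a : List Int) (k : Int) (m : Nat) : ∃ L, pvInv a k m L := by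
  induction m with
  | zero =>
    refine ⟨0, le_refl 0, ?_, ?_, ?_, rfl, ?_, rfl⟩
    · simp [pvStA, pvWin]
    · funext u; simp [pvStA, pvWin]
    · intro u; simp [pvWin]
    · intro v; simp [pvStB, pvPosL, pvOcc]
  | succ m ih =>
    obtain ⟨L, h⟩ := ih
    by_cases hk : k ≤ 0
    · exact ⟨m+1, pv_step_nonpos a k m L hk h⟩
    · by_cases hCA : k < ((pvWin a L m).count (pvAv a m) : Int) + 1
      · obtain ⟨p, _, _, h'⟩ := pv_step_trigger a k m L (by omega) hCA h
        exact ⟨p+1, h'⟩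
      · exact ⟨L, pv_step_quiet a k m L (by omega) hCA h⟩

-- ===== VERDICT (by name: the statement is the Claim_ definition above) =====
theorem solution_spec : Claim_equal_solution := by
  intro n k a _ _
  unfold Spec_solution
  rw [pv_solution_eq_stA, pv_solution_alt_eq_stB]
  obtain ⟨L, h⟩ := pv_main a k n.toNat
  exact h.2.2.2.2.2.2
theorem solution_raises : Claim_raises_solution := by
  unfold Claim_raises_solution
  exact ⟨by intro n k a _ ⟨h1, h2⟩ ⟨p1, p2⟩; exact h2 p2, by decide⟩

-- self-check: the crash-fix region is disjoint from Pre_solution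
theorem solution_raises_disjoint_ok :
    ∀ (n : Int) (k : Int) (a_list : List Int),
      Dom_solution n k a_list → Raises_solution n k a_list → ¬ Pre_solution n k a_list :=
  solution_raises.1
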